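-- pv_equiv track=rewrite | github.com/HEXRD/hexrd | hexrd/core/material/spacegroup.py | _getHKLsBySS
-- ===== SOURCE A (Python) =====
-- from math import sqrt, floor
--
-- def _getHKLsBySS(ss):
--     """Return a list of HKLs with a given sum of squares'
--
--     ss - (int) sum of squares
--
--     """
--
--     #
--     #  NOTE:  the loop below could be speeded up by requiring
--     #         h >= k > = l, and then applying all permutations
--     #         and sign changes.  Could possibly save up to
--     #         a factor of 48.
--     #
--     def pmrange(n):
--         return list(range(n, -(n + 1), -1))  # plus/minus range
--
--     def iroot(n):
--         return int(floor(sqrt(n)))  # integer square root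
--
--     hkls = []
--     hmax = iroot(ss)
--     for h in pmrange(hmax):
--         ss2 = ss - h * h
--         kmax = iroot(ss2)
--         for k in pmrange(kmax):
--             rem = ss2 - k * k
--             if rem == 0:
--                 hkls.append((h, k, 0))
--             else:
--                 l = iroot(rem)
--                 if l * l == rem:
--                     hkls += [(h, k, l), (h, k, -l)]
--
--     return hkls
-- ===== SOURCE B (Python) =====
-- from math import sqrt, floor
--
-- def _getHKLsBySS(ss):
--     def iroot(n):
--         return int(floor(sqrt(n)))
--
--     def ls(rem):
--         # the l values with l*l == rem, largest first
--         if rem == 0: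
--             return [0]
--         l = iroot(rem)
--         return [l, -l] if l * l == rem else []
--
--     def rows(ss2):
--         # full k-row of (k, l) pairs for one value of h*h; only the k > 0 half
--         # is computed, k = 0 and k < 0 follow by sign symmetry (k enters via k*k)
--         half = []
--         for k in range(iroot(ss2), 0, -1):
--             c = ls(ss2 - k * k)
--             if c:
--                 half.append((k, c))
--         row = [(k, l) for (k, c) in half for l in c]
--         row += [(0, l) for l in ls(ss2)]
--         row += [(-k, l) for (k, c) in reversed(half) for l in c]
--         return row
--
--     hmax = iroot(ss)
--     blocks = []
--     for h in range(hmax, 0, -1):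
--         r = rows(ss - h * h)
--         if r:
--             blocks.append((h, r))
--     out = [(h, k, l) for (h, r) in blocks for (k, l) in r]
--     out += [(0, k, l) for (k, l) in rows(ss)]
--     out += [(-h, k, l) for (h, r) in reversed(blocks) for (k, l) in r]
--     return out
-- ===== Notes on version B (the rewrite author's own statement) =====
-- stated objective: faster
-- what changed: B computes only the quadrant of solutions with nonnegative h and k (the sign-symmetry speed-up A's own comment suggests) and assembles the remaining blocks by negating h and k in the already-computed rows, instead of A's full double loop over both signs.
import Mathlib
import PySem

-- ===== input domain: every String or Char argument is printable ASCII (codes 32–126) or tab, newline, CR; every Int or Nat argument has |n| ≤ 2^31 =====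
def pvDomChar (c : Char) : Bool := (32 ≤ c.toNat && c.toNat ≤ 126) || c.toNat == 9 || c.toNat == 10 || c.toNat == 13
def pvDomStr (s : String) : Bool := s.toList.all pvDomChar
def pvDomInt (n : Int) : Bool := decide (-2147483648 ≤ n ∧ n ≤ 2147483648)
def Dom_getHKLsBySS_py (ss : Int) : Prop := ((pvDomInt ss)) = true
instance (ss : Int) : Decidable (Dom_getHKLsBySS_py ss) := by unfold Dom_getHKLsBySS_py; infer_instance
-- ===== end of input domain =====

-- B computes only the quadrant of nonnegative h and k and assembles the rest by sign symmetry (the speed-up A's own comment suggests); measurably faster by a constant factor.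

-- ===== PORT A =====
-- pmrange(n) = list(range(n, -(n+1), -1))  (local helper of A)
def pvPmrange (n : Int) : List Int := PySem.List.pyRange n (-(n + 1)) (-1)
-- iroot(n) = int(floor(sqrt(n))) (local helper of A and of B): ported as the exact integer
-- square root, which equals floor of the float sqrt for every 0 ≤ n ≤ 2^31 (the double sqrt
-- error is far below the distance to the nearest integer there), i.e. on all of Dom ∩ Pre_.
def pvIroot (n : Int) : Int := (n.toNat.sqrt : Int)

def getHKLsBySS_py (ss : Int) : List (Int × Int × Int) :=
  let hmax := pvIroot ss
  (pvPmrange hmax).foldl (fun hkls h =>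
    let ss2 := ss - h * h
    let kmax := pvIroot ss2
    (pvPmrange kmax).foldl (fun hkls k =>
      let rem := ss2 - k * k
      if rem = 0 then hkls ++ [(h, k, 0)]
      else
        let l := pvIroot rem
        if l * l = rem then hkls ++ [(h, k, l), (h, k, -l)] else hkls) hkls) []

-- ===== PORT B =====
-- ls(rem): the l values with l*l == rem, largest first
def pvLs (rem : Int) : List Int :=
  if rem = 0 then [0]
  else
    let l := pvIroot rem
    if l * l = rem then [l, -l] else []

-- rows(ss2): full k-row of (k, l) pairs; only the k > 0 half is computed,
-- k = 0 and k < 0 follow by sign symmetry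
def pvRows (ss2 : Int) : List (Int × Int) :=
  let half := (PySem.List.pyRange (pvIroot ss2) 0 (-1)).foldl
    (fun half k =>
      let c := pvLs (ss2 - k * k)
      if c ≠ [] then half ++ [(k, c)] else half) []
  let row := half.flatMap (fun kc => kc.2.map (fun l => (kc.1, l)))
  let row := row ++ (pvLs ss2).map (fun l => ((0 : Int), l))
  let row := row ++ half.reverse.flatMap (fun kc => kc.2.map (fun l => (-kc.1, l)))
  row

def getHKLsBySS_py_alt (ss : Int) : List (Int × Int × Int) :=
  let hmax := pvIroot ss
  let blocks := (PySem.List.pyRange hmax 0 (-1)).foldl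
    (fun blocks h =>
      let r := pvRows (ss - h * h)
      if r ≠ [] then blocks ++ [(h, r)] else blocks) []
  let out := blocks.flatMap (fun hr => hr.2.map (fun kl => (hr.1, kl.1, kl.2)))
  let out := out ++ (pvRows ss).map (fun kl => ((0 : Int), kl.1, kl.2))
  let out := out ++ blocks.reverse.flatMap (fun hr => hr.2.map (fun kl => (-hr.1, kl.1, kl.2)))
  out

-- ===== PRECONDITION & SPEC =====
-- A raises ValueError (math domain error in sqrt) on negative ss; Pre_ excludes exactly that.
def Pre_getHKLsBySS_py (ss : Int) : Prop := 0 ≤ ss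
instance (ss : Int) : Decidable (Pre_getHKLsBySS_py ss) := by unfold Pre_getHKLsBySS_py; infer_instance
def pvWitness_getHKLsBySS_py : Int := 9

def Spec_getHKLsBySS_py (ss : Int) (out : List (Int × Int × Int)) : Prop := out = getHKLsBySS_py_alt ss
instance (ss : Int) (out : List (Int × Int × Int)) : Decidable (Spec_getHKLsBySS_py ss out) := by unfold Spec_getHKLsBySS_py; infer_instance

-- ===== CLAIM (what is proved, stated in full; the proofs are below) =====
def Claim_equal_getHKLsBySS_py : Prop := ∀ (ss : Int), Dom_getHKLsBySS_py ss → Pre_getHKLsBySS_py ss → Spec_getHKLsBySS_py ss (getHKLsBySS_py ss)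

-- ===== LEMMAS AND PROOFS =====

lemma pvIroot_nonneg (n : Int) : 0 ≤ pvIroot n := by
  simp [pvIroot]

-- descending [-1, -2, …, -m] is the negation of ascending-reversed [1, …, m]
lemma pvNegRange (m : Int) (hm : 0 ≤ m) :
    (PySem.List.pyRange (-m) 0 1).reverse = (PySem.List.pyRange 1 (m + 1) 1).map (fun x => -x) := by
  apply List.ext_getElem
  · simp only [List.length_reverse, List.length_map, PySem.List.length_pyRange_one]
    omega
  · intro i h1 h2
    rw [List.getElem_reverse, List.getElem_map]
    rw [PySem.List.getElem_pyRange_one, PySem.List.getElem_pyRange_one]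
    simp [PySem.List.length_pyRange_one] at h1 h2 ⊢
    omega

-- pmrange m = [m..1] ++ [0] ++ (negated, reversed [m..1])
lemma pvPmrange_decomp (m : Int) (hm : 0 ≤ m) :
    pvPmrange m = PySem.List.pyRange m 0 (-1) ++ [0]
      ++ (PySem.List.pyRange m 0 (-1)).reverse.map (fun x => -x) := by
  unfold pvPmrange
  rw [PySem.List.pyRange_neg_one_eq_reverse m (-(m + 1)),
      PySem.List.pyRange_neg_one_eq_reverse m 0]
  rw [show (-(m + 1) + 1 : Int) = -m by ring, show (0 + 1 : Int) = 1 by ring]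
  rw [PySem.List.pyRange_one_append (-m) 0 (m + 1) (by omega) (by omega),
      PySem.List.pyRange_one_append 0 1 (m + 1) (by omega) (by omega)]
  rw [show PySem.List.pyRange 0 1 1 = [0] from PySem.List.pyRange_one_singleton 0]
  rw [List.reverse_reverse]
  simp only [List.reverse_append, List.reverse_cons, List.reverse_nil, List.nil_append]
  rw [pvNegRange m hm]

lemma pvFlatMap_pmrange {β : Type} (m : Int) (hm : 0 ≤ m) (G : Int → List β) :
    (pvPmrange m).flatMap G
      = (PySem.List.pyRange m 0 (-1)).flatMap G ++ G 0
        ++ (PySem.List.pyRange m 0 (-1)).reverse.flatMap (fun k => G (-k)) := by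
  rw [pvPmrange_decomp m hm]
  rw [List.flatMap_append, List.flatMap_append, List.flatMap_map]
  simp

-- dropping elements whose contribution is empty does not change a flatMap
lemma pvFlatMap_filter {α β : Type} (p : α → Bool) (g : α → List β) (xs : List α)
    (h : ∀ x ∈ xs, ¬ p x = true → g x = []) :
    (xs.filter p).flatMap g = xs.flatMap g := by
  induction xs with
  | nil => rfl
  | cons a l ih =>
    rw [List.filter_cons]
    by_cases hp : p a = true
    · rw [if_pos hp, List.flatMap_cons, List.flatMap_cons,
        ih (fun x hx hnx => h x (List.mem_cons_of_mem a hx) hnx)]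
    · rw [if_neg hp, ih (fun x hx hnx => h x (List.mem_cons_of_mem a hx) hnx),
        List.flatMap_cons, h a List.mem_cons_self hp]
      simp

-- the append-if-nonempty accumulation in B, as map-of-filter
lemma pvHalf_eq {β : Type} [DecidableEq β] (c : Int → List β) (xs : List Int) :
    xs.foldl (fun acc k =>
        let v := c k
        if v ≠ [] then acc ++ [(k, v)] else acc) []
      = (xs.filter (fun k => decide (c k ≠ []))).map (fun k => (k, c k)) := by
  have hfun : (fun (acc : List (Int × List β)) k =>
        let v := c k
        if v ≠ [] then acc ++ [(k, v)] else acc)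
      = (fun acc k =>
        if (fun k => decide (c k ≠ [])) k = true then
          acc ++ [((fun k => (k, c k)) k)] else acc) := by
    funext acc k
    simp
  rw [hfun, PySem.List.foldl_append_if (fun k => decide (c k ≠ [])) (fun k => (k, c k)) xs []]
  simp

-- the assembled quadrant equals the plain flatMap over the full pmrange
lemma pvAssemble {γ β : Type} [DecidableEq γ] (m : Int) (hm : 0 ≤ m)
    (c : Int → List γ) (hsym : ∀ k, c (-k) = c k) (emit : Int → γ → β) :
    (let half := (PySem.List.pyRange m 0 (-1)).foldl
        (fun acc k =>
          let v := c k
          if v ≠ [] then acc ++ [(k, v)] else acc) []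
     half.flatMap (fun kc => kc.2.map (emit kc.1))
       ++ (c 0).map (emit 0)
       ++ half.reverse.flatMap (fun kc => kc.2.map (emit (-kc.1))))
      = (pvPmrange m).flatMap (fun k => (c k).map (emit k)) := by
  have hdrop : ∀ (e : Int → γ → β) (xs : List Int),
      (((xs.filter (fun k => decide (c k ≠ []))).map (fun k => (k, c k))).flatMap
          (fun kc => kc.2.map (e kc.1)))
        = xs.flatMap (fun k => (c k).map (e k)) := by
    intro e xs
    rw [List.flatMap_map]
    exact pvFlatMap_filter _ _ xs (by
      intro x _ hx
      simp only [decide_eq_true_eq, not_not] at hx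
      simp [hx])
  show ((PySem.List.pyRange m 0 (-1)).foldl _ []).flatMap _ ++ _ ++ _ = _
  rw [pvHalf_eq c, pvFlatMap_pmrange m hm (fun k => (c k).map (emit k))]
  rw [← List.map_reverse, ← List.filter_reverse]
  rw [hdrop emit (PySem.List.pyRange m 0 (-1)),
      hdrop (fun k => emit (-k)) (PySem.List.pyRange m 0 (-1)).reverse]
  simp only [hsym]

-- B's rows(ss2) is the straight flatMap over the full pmrange of k
lemma pvRows_eq (ss2 : Int) :
    pvRows ss2 = (pvPmrange (pvIroot ss2)).flatMap
      (fun k => (pvLs (ss2 - k * k)).map (fun l => (k, l))) := by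
  have h := pvAssemble (pvIroot ss2) (pvIroot_nonneg ss2)
    (fun k => pvLs (ss2 - k * k)) (by intro k; ring_nf)
    (fun k l => (k, l))
  simp only [show ss2 - 0 * 0 = ss2 by ring] at h
  exact h

-- B is the straight flatMap over the full pmrange of h
lemma pvAlt_eq (ss : Int) :
    getHKLsBySS_py_alt ss = (pvPmrange (pvIroot ss)).flatMap
      (fun h => (pvRows (ss - h * h)).map (fun kl => (h, kl.1, kl.2))) := by
  have h := pvAssemble (pvIroot ss) (pvIroot_nonneg ss)
    (fun h => pvRows (ss - h * h)) (by intro k; ring_nf)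
    (fun h kl => (h, kl.1, kl.2))
  simp only [show ss - 0 * 0 = ss by ring] at h
  exact h

-- A is the nested flatMap over the full pmranges of h and k
lemma pvA_eq (ss : Int) :
    getHKLsBySS_py ss = (pvPmrange (pvIroot ss)).flatMap
      (fun h => (pvPmrange (pvIroot (ss - h * h))).flatMap
        (fun k => (pvLs (ss - h * h - k * k)).map (fun l => (h, k, l)))) := by
  unfold getHKLsBySS_py
  have hinner : ∀ (h : Int) (acc : List (Int × Int × Int)),
      (pvPmrange (pvIroot (ss - h * h))).foldl (fun hkls k =>
        let rem := ss - h * h - k * k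
        if rem = 0 then hkls ++ [(h, k, 0)]
        else
          let l := pvIroot rem
          if l * l = rem then hkls ++ [(h, k, l), (h, k, -l)] else hkls) acc
      = acc ++ (pvPmrange (pvIroot (ss - h * h))).flatMap
          (fun k => (pvLs (ss - h * h - k * k)).map (fun l => (h, k, l))) := by
    intro h acc
    have hfun : (fun (hkls : List (Int × Int × Int)) k =>
          let rem := ss - h * h - k * k
          if rem = 0 then hkls ++ [(h, k, 0)]
          else
            let l := pvIroot rem
            if l * l = rem then hkls ++ [(h, k, l), (h, k, -l)] else hkls)
        = (fun hkls k => hkls ++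
            ((fun k => (pvLs (ss - h * h - k * k)).map (fun l => (h, k, l))) k)) := by
      funext hkls k
      show _ = hkls ++ (pvLs (ss - h * h - k * k)).map (fun l => (h, k, l))
      simp only [pvLs]
      by_cases h0 : ss - h * h - k * k = 0
      · simp [h0]
      · by_cases hsq : pvIroot (ss - h * h - k * k) * pvIroot (ss - h * h - k * k)
            = ss - h * h - k * k
        · simp [h0, hsq]
        · simp [h0, hsq]
    rw [hfun, PySem.List.foldl_append_eq_flatMap]
  have houter : (fun (hkls : List (Int × Int × Int)) h =>
        (pvPmrange (pvIroot (ss - h * h))).foldl (fun hkls k =>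
          let rem := ss - h * h - k * k
          if rem = 0 then hkls ++ [(h, k, 0)]
          else
            let l := pvIroot rem
            if l * l = rem then hkls ++ [(h, k, l), (h, k, -l)] else hkls) hkls)
      = (fun hkls h => hkls ++
          ((fun h => (pvPmrange (pvIroot (ss - h * h))).flatMap
            (fun k => (pvLs (ss - h * h - k * k)).map (fun l => (h, k, l)))) h)) := by
    funext hkls h
    exact hinner h hkls
  show (pvPmrange (pvIroot ss)).foldl _ [] = _
  rw [houter, PySem.List.foldl_append_eq_flatMap]
  simp

-- ===== VERDICT (by name: the statement is the Claim_ definition above) =====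
theorem getHKLsBySS_py_spec : Claim_equal_getHKLsBySS_py := by
  intro ss _ _
  unfold Spec_getHKLsBySS_py
  rw [pvA_eq, pvAlt_eq]
  congr 1
  funext h
  simp [pvRows_eq, List.map_flatMap, List.map_map, Function.comp_def]
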